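-- pv_equiv track=rewrite | github.com/fingerflinger/wordle_bot | wordle_bot.py | find_idx_in_active_digits
-- ===== SOURCE A (Python) =====
-- def find_idx_in_active_digits(word, active_digits, letter):
--     loc = word.find(letter) # First occurance
--     loc_offset = 0
--     if loc == -1:
--         return -1
--     if active_digits[loc] == True:
--         return loc
--     while(active_digits[loc+loc_offset] == False):
--         # How to handle 3-4 occurances of the same letter? Need to update loc
--         new_offset = word[(loc+loc_offset+1):].find(letter) # Need to search only active digits
--         if new_offset == -1:
--             # Eventually we will hit the end of the word and end up here
--             return -1
--         loc_offset = loc_offset + new_offset + 1 # + 1 here because -1 indicates fail 2 find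
--
--     # We kick out of the loop once active_digits[loc+locoffset] is True
--     return loc+loc_offset
-- ===== SOURCE B (Python) =====
-- def find_idx_in_active_digits(word, active_digits, letter):
--     n = len(letter)
--     for i in range(len(word) - n + 1):
--         if word[i:i+n] == letter and not (active_digits[i] == False):
--             return i
--     return -1
-- ===== Notes on version B (the rewrite author's own statement) =====
-- stated objective: simpler
-- what changed: B replaces A's repeated word.find/offset-chaining loop over successive occurrences with a single linear scan over all positions, returning the first position where the letter occurs and is active.
-- outside the precondition, e.g. on find_idx_in_active_digits('a', [False, False, True], ''): A returns 2, B returns -1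
import Mathlib
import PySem

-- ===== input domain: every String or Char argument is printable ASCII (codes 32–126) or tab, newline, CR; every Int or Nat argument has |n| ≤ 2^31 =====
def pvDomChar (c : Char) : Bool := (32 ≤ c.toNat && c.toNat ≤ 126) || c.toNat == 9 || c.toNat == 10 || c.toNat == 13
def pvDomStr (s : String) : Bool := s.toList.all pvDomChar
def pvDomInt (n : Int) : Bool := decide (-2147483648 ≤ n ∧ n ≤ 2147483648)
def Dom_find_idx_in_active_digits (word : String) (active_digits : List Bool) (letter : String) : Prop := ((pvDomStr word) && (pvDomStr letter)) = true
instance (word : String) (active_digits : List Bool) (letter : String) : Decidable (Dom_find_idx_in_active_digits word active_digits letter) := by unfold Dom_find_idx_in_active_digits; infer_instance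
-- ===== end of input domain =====

-- B replaces A's repeated find/offset-chaining over successive occurrences with one linear scan
-- over all positions (objective: simpler); return values proved equal on Pre_.


-- ===== PORT A =====
-- the while loop of A; `fuel` only makes the recursion structural (inside Pre_ it never runs out:
-- each iteration moves to a strictly later occurrence, and occurrences are < word length).
-- active_digits[…] is ported as (pyGet? …).getD false: Pre_ excludes the inputs where Python raises IndexError.
def pvALoop (w : List Char) (active : List Bool) (l : List Char) (loc off : Int) : Nat → Int
  | 0 => -1
  | fuel + 1 =>
    if (PySem.List.pyGet? active (loc + off)).getD false = false then
      let new_offset := PySem.Chars.find (PySem.List.slice w (some (loc + off + 1)) none) l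
      if new_offset = -1 then -1
      else pvALoop w active l loc (off + new_offset + 1) fuel
    else loc + off

def find_idx_in_active_digits (word : String) (active_digits : List Bool) (letter : String) : Int :=
  let w := word.toList
  let l := letter.toList
  let loc := PySem.Chars.find w l
  if loc = -1 then -1
  else if (PySem.List.pyGet? active_digits loc).getD false = true then loc
  else pvALoop w active_digits l loc 0 (w.length + 1)

-- ===== PORT B =====
-- for i in range(len(word) - n + 1): …  — i counts up, `r` is the number of positions left to try.
def pvBLoop (w : List Char) (active : List Bool) (l : List Char) (i : Nat) : Nat → Int
  | 0 => -1
  | r + 1 =>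
    if PySem.List.slice w (some (i : Int)) (some ((i : Int) + (l.length : Int))) = l
        ∧ ¬ ((PySem.List.pyGet? active (i : Int)).getD false = false)
    then (i : Int)
    else pvBLoop w active l (i + 1) r

def find_idx_in_active_digits_alt (word : String) (active_digits : List Bool) (letter : String) : Int :=
  let w := word.toList
  let l := letter.toList
  pvBLoop w active_digits l 0 (w.length + 1 - l.length)

-- ===== PRECONDITION & SPEC =====
-- Pre_ excludes (a) empty-letter inputs whose first active index lies beyond the word's end (or where
-- all actives are False), on which A's `"".find` chaining scans active_digits past the word's end — an
-- artefact B's scan over word positions cannot share — and (b) the inputs on which A raises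
-- IndexError: an occurrence of `letter` at a position ≥ len(active_digits) that A reaches because no
-- earlier occurrence is active.
def Pre_find_idx_in_active_digits (word : String) (active_digits : List Bool) (letter : String) : Prop :=
  (letter = "" → ∃ t : Nat, t ≤ word.toList.length ∧
      (∃ h : t < active_digits.length, active_digits[t] = true) ∧
      ∀ s : Nat, s < t → ∀ h : s < active_digits.length, active_digits[s] = false) ∧
  ∀ p : Nat, p < word.toList.length → letter.toList <+: word.toList.drop p →
    (p < active_digits.length ∨
      ∃ q : Nat, q < p ∧ letter.toList <+: word.toList.drop q ∧
        ∃ h : q < active_digits.length, active_digits[q] = true)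

instance (word : String) (active_digits : List Bool) (letter : String) : Decidable (Pre_find_idx_in_active_digits word active_digits letter) := by unfold Pre_find_idx_in_active_digits; infer_instance

def pvWitness_find_idx_in_active_digits : String × List Bool × String := ("aba", [false, true, false], "a")

def Spec_find_idx_in_active_digits (word : String) (active_digits : List Bool) (letter : String) (out : Int) : Prop := out = find_idx_in_active_digits_alt word active_digits letter
instance (word : String) (active_digits : List Bool) (letter : String) (out : Int) : Decidable (Spec_find_idx_in_active_digits word active_digits letter out) := by unfold Spec_find_idx_in_active_digits; infer_instance

-- ===== CLAIM (what is proved, stated in full; the proofs are below) =====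
def Claim_equal_find_idx_in_active_digits : Prop := ∀ (word : String) (active_digits : List Bool) (letter : String), Dom_find_idx_in_active_digits word active_digits letter → Pre_find_idx_in_active_digits word active_digits letter → Spec_find_idx_in_active_digits word active_digits letter (find_idx_in_active_digits word active_digits letter)

-- ===== LEMMAS AND PROOFS =====
-- abbreviations used only by the proofs
def pvOcc (w l : List Char) (p : Nat) : Prop := l <+: w.drop p
def pvAct (active : List Bool) (p : Nat) : Bool := active.getD p false

theorem pvBLoop_cond_iff (w : List Char) (active : List Bool) (l : List Char) (i : Nat) :
    (PySem.List.slice w (some (i : Int)) (some ((i : Int) + (l.length : Int))) = l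
      ∧ ¬ ((PySem.List.pyGet? active (i : Int)).getD false = false))
    ↔ (pvOcc w l i ∧ pvAct active i = true) := by
  rw [PySem.List.slice_natCast_add, PySem.List.pyGet?_natCast]
  constructor
  · rintro ⟨h1, h2⟩
    refine ⟨?_, ?_⟩
    · rw [pvOcc, List.prefix_iff_eq_take]
      exact h1.symm
    · simp only [pvAct, List.getD_eq_getElem?_getD]
      simpa using h2
  · rintro ⟨h1, h2⟩
    refine ⟨?_, ?_⟩
    · rw [pvOcc, List.prefix_iff_eq_take] at h1
      exact h1.symm
    · simp only [pvAct, List.getD_eq_getElem?_getD] at h2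
      simp [h2]

-- skipping positions where the condition fails
theorem pvBLoop_skip (w : List Char) (active : List Bool) (l : List Char) :
    ∀ (d i r : Nat), d ≤ r →
    (∀ k : Nat, i ≤ k → k < i + d → ¬ (pvOcc w l k ∧ pvAct active k = true)) →
    pvBLoop w active l i r = pvBLoop w active l (i + d) (r - d) := by
  intro d
  induction d with
  | zero => intro i r _ _; simp
  | succ d ih =>
    intro i r hdr hk
    obtain ⟨r', rfl⟩ : ∃ r', r = r' + 1 := ⟨r - 1, by omega⟩
    rw [pvBLoop]
    rw [if_neg]
    · have := ih (i + 1) r' (by omega) (by intro k hk1 hk2; exact hk k (by omega) (by omega))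
      rw [this]
      congr 1 <;> omega
    · rw [pvBLoop_cond_iff]
      exact hk i (le_refl i) (by omega)

theorem pvBLoop_none (w : List Char) (active : List Bool) (l : List Char) :
    ∀ (r i : Nat),
    (∀ k : Nat, i ≤ k → k < i + r → ¬ (pvOcc w l k ∧ pvAct active k = true)) →
    pvBLoop w active l i r = -1 := by
  intro r
  induction r with
  | zero => intro i _; rfl
  | succ r ih =>
    intro i hk
    rw [pvBLoop, if_neg]
    · exact ih (i + 1) (by intro k h1 h2; exact hk k (by omega) (by omega))
    · rw [pvBLoop_cond_iff]; exact hk i (le_refl i) (by omega)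

theorem pvBLoop_hit (w : List Char) (active : List Bool) (l : List Char) (i r j : Nat)
    (hij : i ≤ j) (hjr : j < i + r)
    (hj : pvOcc w l j ∧ pvAct active j = true)
    (hmin : ∀ k : Nat, i ≤ k → k < j → ¬ (pvOcc w l k ∧ pvAct active k = true)) :
    pvBLoop w active l i r = (j : Int) := by
  rw [pvBLoop_skip w active l (j - i) i r (by omega) (by intro k h1 h2; exact hmin k h1 (by omega))]
  have hji : i + (j - i) = j := by omega
  rw [hji]
  obtain ⟨r', hr'⟩ : ∃ r', r - (j - i) = r' + 1 := ⟨r - (j - i) - 1, by omega⟩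
  rw [hr', pvBLoop, if_pos]
  rw [pvBLoop_cond_iff]
  exact hj

-- occurrence bound: a nonempty-letter occurrence lies strictly inside the word
theorem pvOcc_lt (w l : List Char) (p : Nat) (hl : l ≠ []) (h : pvOcc w l p) :
    p + l.length ≤ w.length := by
  have h1 := h.length_le
  rw [List.length_drop] at h1
  have h2 : 0 < l.length := List.length_pos_iff.mpr hl
  by_cases hp : p ≤ w.length
  · omega
  · exfalso
    have : w.drop p = [] := List.drop_eq_nil_of_le (by omega)
    rw [pvOcc, this, List.prefix_nil] at h
    exact hl h

theorem pvOcc_infix_drop (w l : List Char) (p q : Nat) (hpq : q ≤ p) (h : pvOcc w l p) :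
    l <:+: w.drop q := by
  have : w.drop p = (w.drop q).drop (p - q) := by
    rw [List.drop_drop]; congr 1; omega
  rw [pvOcc, this] at h
  exact h.isInfix.trans (List.drop_suffix _ _).isInfix

-- A's while loop equals B's scan started at the current position
theorem pvALoop_eq_pvBLoop (w : List Char) (active : List Bool) (l : List Char) (hl : l ≠ []) :
    ∀ (fuel : Nat) (pos : Nat) (loc off : Int),
    loc + off = (pos : Int) → pvOcc w l pos → w.length + 1 - pos ≤ fuel →
    pvALoop w active l loc off fuel = pvBLoop w active l pos (w.length + 1 - l.length - pos) := by
  intro fuel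
  induction fuel with
  | zero =>
    intro pos loc off hsum hocc hfuel
    exfalso
    have := pvOcc_lt w l pos hl hocc
    have : 0 < l.length := List.length_pos_iff.mpr hl
    omega
  | succ fuel ih =>
    intro pos loc off hsum hocc hfuel
    have hposlt := pvOcc_lt w l pos hl hocc
    have hlpos : 0 < l.length := List.length_pos_iff.mpr hl
    have hrange : 0 < w.length + 1 - l.length - pos := by omega
    rw [pvALoop, hsum]
    by_cases hact : pvAct active pos = true
    · -- active here: A returns pos, B hits at pos immediately
      have hactI : active[pos]?.getD false = true := by
        simpa [pvAct, List.getD_eq_getElem?_getD] using hact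
      rw [if_neg (by simp [hactI])]
      rw [pvBLoop_hit w active l pos _ pos (le_refl _) (by omega) ⟨hocc, hact⟩ (by intro k h1 h2; omega)]
    · have hactf : (PySem.List.pyGet? active (pos : Int)).getD false = false := by
        simp [pvAct, List.getD_eq_getElem?_getD, PySem.List.pyGet?_natCast] at hact ⊢
        revert hact; cases (active[pos]?.getD false) <;> simp
      rw [if_pos hactf]
      have hslice : PySem.List.slice w (some ((pos : Int) + 1)) none = w.drop (pos + 1) := by
        have : (pos : Int) + 1 = ((pos + 1 : Nat) : Int) := by push_cast; ring
        rw [this, PySem.List.slice_from_natCast]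
      rw [hslice]
      by_cases hfind : PySem.Chars.find (w.drop (pos + 1)) l = -1
      · -- no later occurrence: both return -1
        rw [if_pos hfind]
        have hno : ¬ l <:+: w.drop (pos + 1) := (PySem.Chars.find_eq_neg_one_iff _ _).mp hfind
        rw [pvBLoop_none]
        intro k h1 h2
        rintro ⟨hk1, hk2⟩
        rcases Nat.eq_or_lt_of_le h1 with h | h
        · subst h; exact hact hk2
        · exact hno (pvOcc_infix_drop w l k (pos + 1) h hk1)
      · rw [if_neg hfind]
        set q := PySem.Chars.find (w.drop (pos + 1)) l with hq
        have hq0 : 0 ≤ q := by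
          rw [hq, PySem.Chars.find_nonneg_iff]
          exact (PySem.Chars.find_ne_neg_one_iff _ _).mp hfind
        have hspec := PySem.Chars.find_spec hq0
        have hdd : (w.drop (pos + 1)).drop q.toNat = w.drop (pos + 1 + q.toNat) := by
          rw [List.drop_drop]
        have hocc' : pvOcc w l (pos + 1 + q.toNat) := by
          rw [pvOcc, ← hdd]; exact hspec.1
        have hsum' : loc + (off + q + 1) = ((pos + 1 + q.toNat : Nat) : Int) := by
          push_cast; omega
        rw [ih (pos + 1 + q.toNat) loc (off + q + 1) hsum' hocc' (by
          have := pvOcc_lt w l (pos + 1 + q.toNat) hl hocc'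
          omega)]
        -- B skips from pos to pos+1+q.toNat: nothing matches strictly between
        rw [pvBLoop_skip w active l (1 + q.toNat) pos _ (by
          have := pvOcc_lt w l (pos + 1 + q.toNat) hl hocc'
          omega)]
        · congr 1 <;> omega
        · intro k h1 h2
          rintro ⟨hk1, hk2⟩
          rcases Nat.eq_or_lt_of_le h1 with h | h
          · subst h; exact hact hk2
          · have : k = pos + 1 + (k - pos - 1) := by omega
            rw [pvOcc, this, ← List.drop_drop] at hk1
            exact hspec.2 (k - pos - 1) (by omega) hk1


-- the empty-letter case: A's while loop steps through positions 0,1,2,… ("".find is always 0)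
theorem pvALoop_nil (w : List Char) (active : List Bool) (t : Nat)
    (htT : pvAct active t = true) (hlt : ∀ s : Nat, s < t → pvAct active s = false) :
    ∀ (fuel pos : Nat) (loc off : Int),
    loc + off = (pos : Int) → pos ≤ t → t + 1 - pos ≤ fuel →
    pvALoop w active [] loc off fuel = (t : Int) := by
  intro fuel
  induction fuel with
  | zero => intro pos loc off _ _ hfuel; omega
  | succ fuel ih =>
    intro pos loc off hsum hpos hfuel
    rw [pvALoop, hsum]
    by_cases hpt : pos = t
    · subst hpt
      have hactI : active[pos]?.getD false = true := by
        simpa [pvAct, List.getD_eq_getElem?_getD] using htT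
      rw [if_neg (by simp [hactI])]
    · have hactf : (PySem.List.pyGet? active (pos : Int)).getD false = false := by
        have := hlt pos (by omega)
        simp only [pvAct, List.getD_eq_getElem?_getD] at this
        simp only [PySem.List.pyGet?_natCast]
        exact this
      rw [if_pos hactf, PySem.Chars.find_nil]
      show (if (0 : Int) = -1 then (-1 : Int) else pvALoop w active [] loc (off + 0 + 1) fuel) = (t : Int)
      rw [if_neg (by norm_num)]
      exact ih (pos + 1) loc (off + 0 + 1) (by push_cast; omega) (by omega) (by omega)

-- ===== VERDICT (by name: the statement is the Claim_ definition above) =====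
theorem find_idx_in_active_digits_spec : Claim_equal_find_idx_in_active_digits := by
  intro word active letter _ hpre
  unfold Spec_find_idx_in_active_digits find_idx_in_active_digits find_idx_in_active_digits_alt
  dsimp only
  set w := word.toList
  set l := letter.toList
  by_cases hnil : l = []
  · -- empty letter: Pre_ gives the first active index t, inside the word; both return t
    obtain ⟨t, htle, ⟨hlen, htrue⟩, hbefore⟩ := hpre.1 (String.toList_eq_nil_iff.mp hnil)
    have htT : pvAct active t = true := by
      unfold pvAct
      rw [List.getD_eq_getElem?_getD, List.getElem?_eq_getElem hlen]
      simpa using htrue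
    have hlt : ∀ s : Nat, s < t → pvAct active s = false := by
      intro s hs
      have hsl : s < active.length := by omega
      unfold pvAct
      rw [List.getD_eq_getElem?_getD, List.getElem?_eq_getElem hsl]
      simpa using hbefore s hs hsl
    have hwlen : w.length = word.toList.length := rfl
    have hminB : ∀ k : Nat, 0 ≤ k → k < t → ¬ (pvOcc w l k ∧ pvAct active k = true) := by
      rintro k _ hk ⟨_, hk2⟩
      rw [hlt k hk] at hk2
      exact Bool.false_ne_true hk2
    rw [hnil]
    rw [PySem.Chars.find_nil, if_neg (by norm_num)]
    have hB : pvBLoop w active [] 0 (w.length + 1 - List.length ([] : List Char)) = (t : Int) := by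
      refine pvBLoop_hit w active [] 0 _ t (Nat.zero_le _) (by simp only [List.length_nil]; omega) ⟨List.nil_prefix, htT⟩ ?_
      · rw [hnil] at hminB; exact hminB
    by_cases ht0 : t = 0
    · subst ht0
      have hactI : active[0]?.getD false = true := by
        simpa [pvAct, List.getD_eq_getElem?_getD] using htT
      rw [if_pos (by rw [PySem.List.pyGet?_zero]; exact hactI)]
      rw [hB]
      norm_num
    · have hactf0 : pvAct active 0 = false := hlt 0 (by omega)
      rw [if_neg (by
        have h0 := hactf0
        simp only [pvAct, List.getD_eq_getElem?_getD] at h0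
        rw [PySem.List.pyGet?_zero, h0]
        simp)]
      rw [hB]
      exact pvALoop_nil w active t htT hlt (w.length + 1) 0 0 0 (by norm_num) (Nat.zero_le t) (by omega)
  · have hl' : l ≠ [] := hnil
    by_cases hfind : PySem.Chars.find w l = -1
    · rw [if_pos hfind]
      have hno : ¬ l <:+: w := (PySem.Chars.find_eq_neg_one_iff _ _).mp hfind
      rw [pvBLoop_none]
      intro k _ _
      rintro ⟨hk1, _⟩
      exact hno (pvOcc_infix_drop w l k 0 (Nat.zero_le k) hk1)
    · rw [if_neg hfind]
      set loc := PySem.Chars.find w l with hloc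
      have hq0 : 0 ≤ loc := by
        rw [hloc, PySem.Chars.find_nonneg_iff]
        exact (PySem.Chars.find_ne_neg_one_iff _ _).mp hfind
      have hspec := PySem.Chars.find_spec hq0
      have hocc0 : pvOcc w l loc.toNat := by rw [pvOcc]; exact hspec.1
      have hmin0 : ∀ k : Nat, k < loc.toNat → ¬ pvOcc w l k := fun k hk => hspec.2 k hk
      have hbound := pvOcc_lt w l loc.toNat hl' hocc0
      have hlpos : 0 < l.length := List.length_pos_iff.mpr hl'
      by_cases hact : pvAct active loc.toNat = true
      · rw [if_pos (by
          simp only [pvAct, List.getD_eq_getElem?_getD] at hact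
          rw [PySem.List.pyGet?_of_nonneg active hq0]
          simp [hact])]
        rw [pvBLoop_hit w active l 0 _ loc.toNat (Nat.zero_le _) (by omega) ⟨hocc0, hact⟩
          (by intro k _ hk; rintro ⟨h1, _⟩; exact hmin0 k hk h1)]
        omega
      · rw [if_neg (by
          simp only [pvAct, List.getD_eq_getElem?_getD] at hact
          rw [PySem.List.pyGet?_of_nonneg active hq0]
          simpa using hact)]
        rw [pvALoop_eq_pvBLoop w active l hl' (w.length + 1) loc.toNat loc 0 (by omega) hocc0 (by omega)]
        rw [pvBLoop_skip w active l loc.toNat 0 _ (by omega)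
          (by intro k _ hk; rintro ⟨h1, _⟩; exact hmin0 k (by omega) h1)]
        congr 1
        omega
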